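-- pv_equiv track=rewrite | github.com/Chopadeanand/Attendance | generate_pdf_invoices.py | rupees
-- ===== SOURCE A (Python) =====
-- def rupees(n):
--     """Format number as Indian rupees."""
--     n = round(n)
--     s = str(n)
--     if len(s) <= 3:
--         return s
--     result = s[-3:]
--     s = s[:-3]
--     while len(s) > 2:
--         result = s[-2:] + ',' + result
--         s = s[:-2]
--     if s:
--         result = s + ',' + result
--     return result
-- ===== SOURCE B (Python) =====
-- def rupees(n):
--     """Format number as Indian rupees."""
--     s = str(round(n))
--     r = s[::-1]
--     groups = [r[:3][::-1]]
--     i = 3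
--     while i < len(r):
--         groups.append(r[i:i+2][::-1])
--         i += 2
--     groups.reverse()
--     return ','.join(groups)
-- ===== Notes on version B (the rewrite author's own statement) =====
-- stated objective: alternative
-- what changed: B reverses the digit string once and collects fixed-size chunks (3, then 2s) into a list that is reversed and joined with ','.join, instead of A's while loop that repeatedly slices the tail off the string and grows the result by string concatenation.
import Mathlib
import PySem

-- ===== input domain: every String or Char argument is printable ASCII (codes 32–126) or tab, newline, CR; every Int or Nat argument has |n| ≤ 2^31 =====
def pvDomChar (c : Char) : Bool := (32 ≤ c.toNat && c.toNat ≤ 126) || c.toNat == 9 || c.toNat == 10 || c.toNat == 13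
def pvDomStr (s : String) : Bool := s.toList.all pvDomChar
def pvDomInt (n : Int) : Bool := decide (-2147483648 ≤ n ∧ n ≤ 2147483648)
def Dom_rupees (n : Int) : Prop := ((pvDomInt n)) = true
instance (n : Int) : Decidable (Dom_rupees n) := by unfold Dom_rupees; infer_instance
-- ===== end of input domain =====

-- B groups the reversed digit string into chunks (3 then 2s) collected in a list and joined,
-- instead of A's tail-slicing concatenation loop; return values proved equal on all Int inputs.

-- ===== PORT A =====
-- the 'while len(s) > 2' loop followed by the trailing 'if s:' of A, over List Char
def rupeesLoop (s result : List Char) : List Char :=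
  if 2 < s.length then
    rupeesLoop (PySem.List.slice s none (some (-2)))
      (PySem.List.slice s (some (-2)) none ++ ',' :: result)
  else if s ≠ [] then s ++ ',' :: result
  else result
termination_by s.length
decreasing_by
  rw [PySem.List.slice_to_neg_ofNat s 2 (by omega)]
  simp only [List.length_take]; omega

def rupees (n : Int) : String :=
  -- n = round(n) is the identity on int
  let s := PySem.Int.toChars n
  if s.length ≤ 3 then String.ofList s
  else
    let result := PySem.List.slice s (some (-3)) none
    let s := PySem.List.slice s none (some (-3))
    String.ofList (rupeesLoop s result)

-- ===== PORT B =====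
-- B's 'while i < len(r)' loop appending r[i:i+2][::-1] to groups
def rupeesAltLoop (r : List Char) (i : Nat) (groups : List (List Char)) : List (List Char) :=
  if i < r.length then
    rupeesAltLoop r (i + 2)
      (groups ++ [(PySem.List.slice r (some (i : Int)) (some ((i : Int) + 2))).reverse])
  else groups
termination_by r.length - i

def rupees_alt (n : Int) : String :=
  let s := PySem.Int.toChars n
  let r := s.reverse  -- s[::-1]; exact by PySem.List.slice?_none_none_neg_one
  let groups := [(PySem.List.slice r none (some 3)).reverse]
  let groups := rupeesAltLoop r 3 groups
  String.ofList (PySem.Chars.join [','] groups.reverse)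

-- ===== PRECONDITION & SPEC =====
def Spec_rupees (n : Int) (out : String) : Prop := out = rupees_alt n
instance (n : Int) (out : String) : Decidable (Spec_rupees n out) := by unfold Spec_rupees; infer_instance

-- ===== CLAIM (what is proved, stated in full; the proofs are below) =====
def Claim_equal_rupees : Prop := ∀ (n : Int), Dom_rupees n → Spec_rupees n (rupees n)

-- ===== LEMMAS AND PROOFS =====

-- the right-to-left 2-grouping both loops realise: chunks of the REVERSED string, each re-reversed
def chunkList (l : List Char) : List (List Char) :=
  if l = [] then [] else (l.take 2).reverse :: chunkList (l.drop 2)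
termination_by l.length
decreasing_by
  rename_i h
  have : 0 < l.length := List.length_pos_iff.mpr h
  simp only [List.length_drop]; omega

lemma slice_two (r : List Char) (i : Nat) :
    PySem.List.slice r (some (i : Int)) (some ((i : Int) + 2)) = (r.drop i).take 2 := by
  have h : ((i : Int) + 2) = ((i : Int) + ((2 : Nat) : Int)) := by norm_num
  rw [h, PySem.List.slice_natCast_add]

lemma rupeesAltLoop_eq (r : List Char) (i : Nat) (groups : List (List Char)) :
    rupeesAltLoop r i groups = groups ++ chunkList (r.drop i) := by
  induction i, groups using rupeesAltLoop.induct r with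
  | case1 i groups h ih =>
    rw [rupeesAltLoop.eq_def, if_pos h, ih]
    have hc : chunkList (List.drop i r) =
        ((List.drop i r).take 2).reverse :: chunkList ((List.drop i r).drop 2) := by
      rw [chunkList.eq_def, if_neg (by simp only [List.drop_eq_nil_iff]; omega)]
    rw [hc, slice_two]
    simp [List.drop_drop]
  | case2 i groups h =>
    rw [rupeesAltLoop.eq_def, if_neg h,
      chunkList.eq_def, if_pos (by rw [List.drop_eq_nil_iff]; omega)]
    simp

lemma rupeesLoop_eq (s result : List Char) :
    rupeesLoop s result =
      (chunkList s.reverse).foldl (fun acc c => c ++ ',' :: acc) result := by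
  induction s, result using rupeesLoop.induct with
  | case1 s result h ih =>
    rw [rupeesLoop.eq_def, if_pos h, ih]
    have hc : chunkList s.reverse =
        (s.reverse.take 2).reverse :: chunkList (s.reverse.drop 2) := by
      rw [chunkList.eq_def,
        if_neg (by simp only [List.reverse_eq_nil_iff]; rintro rfl; simp at h)]
    rw [hc, PySem.List.slice_to_neg_ofNat s 2 (by omega),
        PySem.List.slice_from_neg_ofNat s 2 (by omega)]
    simp [List.take_reverse, List.drop_reverse, List.foldl_cons]
  | case2 s result h h2 =>
    rw [rupeesLoop.eq_def, if_neg h, if_pos h2]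
    rw [chunkList.eq_def, if_neg (by simpa using h2)]
    rw [chunkList.eq_def, if_pos (by simp only [List.drop_eq_nil_iff, List.length_reverse]; omega)]
    have hne : s ≠ [] := by simpa using h2
    have hlen : 0 < s.length := List.length_pos_iff.mpr hne
    have : s.reverse.take 2 = s.reverse := List.take_of_length_le (by simp only [List.length_reverse]; omega)
    simp [this]
  | case3 s result h h2 =>
    rw [rupeesLoop.eq_def, if_neg h, if_neg h2]
    have : s = [] := by simpa using h2
    subst this
    rw [List.reverse_nil, chunkList.eq_def]
    simp

lemma join_last_comma (cs : List (List Char)) (a b : List Char) :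
    PySem.Chars.join [','] (cs ++ [a, b]) =
      PySem.Chars.join [','] (cs ++ [a ++ ',' :: b]) := by
  induction cs with
  | nil => simp [PySem.Chars.join_cons_cons, PySem.Chars.join_singleton]
  | cons c t ih =>
    cases t with
    | nil =>
      simp [PySem.Chars.join_cons_cons, PySem.Chars.join_singleton]
    | cons d u =>
      simp only [List.cons_append]
      rw [PySem.Chars.join_cons_cons, PySem.Chars.join_cons_cons]
      rw [← List.cons_append, ih]
      simp [List.cons_append]

lemma foldl_eq_join (cs : List (List Char)) (g : List Char) :
    cs.foldl (fun acc c => c ++ ',' :: acc) g =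
      PySem.Chars.join [','] (cs.reverse ++ [g]) := by
  induction cs generalizing g with
  | nil => simp [PySem.Chars.join_singleton]
  | cons c t ih =>
    simp only [List.foldl_cons, List.reverse_cons]
    rw [ih, List.append_assoc]
    exact (join_last_comma t.reverse c g).symm

-- ===== VERDICT (by name: the statement is the Claim_ definition above) =====
theorem rupees_spec : Claim_equal_rupees := by
  intro n _
  show rupees n = rupees_alt n
  simp only [rupees, rupees_alt]
  set s := PySem.Int.toChars n with hs
  rw [PySem.List.slice_to s.reverse (by norm_num : (0:Int) ≤ 3),
    show Int.toNat 3 = 3 from rfl]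
  by_cases h3 : s.length ≤ 3
  · rw [if_pos h3]
    rw [rupeesAltLoop.eq_def, if_neg (by simp only [List.length_reverse]; omega)]
    have : s.reverse.take 3 = s.reverse :=
      List.take_of_length_le (by simp only [List.length_reverse]; omega)
    rw [this]
    simp [PySem.Chars.join_singleton]
  · rw [if_neg h3]
    rw [rupeesAltLoop_eq, rupeesLoop_eq,
        PySem.List.slice_to_neg_ofNat s 3 (by omega),
        PySem.List.slice_from_neg_ofNat s 3 (by omega)]
    rw [foldl_eq_join]
    have h1 : s.reverse.take 3 = (s.drop (s.length - 3)).reverse := List.take_reverse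
    have h2 : s.reverse.drop 3 = (s.take (s.length - 3)).reverse := List.drop_reverse
    rw [h1, h2]
    simp [List.reverse_reverse]
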